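-- pv_equiv track=rewrite | github.com/DigitalHallucinations/forgewire-fabric | python/forgewire_fabric/hub/server.py | _runner_rollup_status
-- ===== SOURCE A (Python) =====
-- from typing import Any, Literal
--
-- def _runner_rollup_status(runners: list[dict[str, Any]]) -> str:
--     if not runners:
--         return "registered"
--     states = {str(r.get("state") or "unknown") for r in runners}
--     for state in ("online", "draining", "degraded", "offline"):
--         if state in states:
--             return state
--     return sorted(states)[0] if states else "unknown"
-- ===== SOURCE B (Python) =====
-- def _runner_rollup_status(runners):
--     if not runners:
--         return "registered"
--     priority = ("online", "draining", "degraded", "offline")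
--
--     def key(s):
--         if s in priority:
--             return (priority.index(s), "")
--         return (len(priority), s)
--
--     return min((str(r.get("state") or "unknown") for r in runners), key=key)
-- ===== Notes on version B (the rewrite author's own statement) =====
-- stated objective: simpler
-- what changed: Replaced the set construction + fixed-priority membership loop + sorted()[0] fallback with a single keyed argmin pass: each state gets the key (priority.index(s), '') if it is a priority state and (4, s) otherwise, and min() over the states returns the answer directly.
import Mathlib
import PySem

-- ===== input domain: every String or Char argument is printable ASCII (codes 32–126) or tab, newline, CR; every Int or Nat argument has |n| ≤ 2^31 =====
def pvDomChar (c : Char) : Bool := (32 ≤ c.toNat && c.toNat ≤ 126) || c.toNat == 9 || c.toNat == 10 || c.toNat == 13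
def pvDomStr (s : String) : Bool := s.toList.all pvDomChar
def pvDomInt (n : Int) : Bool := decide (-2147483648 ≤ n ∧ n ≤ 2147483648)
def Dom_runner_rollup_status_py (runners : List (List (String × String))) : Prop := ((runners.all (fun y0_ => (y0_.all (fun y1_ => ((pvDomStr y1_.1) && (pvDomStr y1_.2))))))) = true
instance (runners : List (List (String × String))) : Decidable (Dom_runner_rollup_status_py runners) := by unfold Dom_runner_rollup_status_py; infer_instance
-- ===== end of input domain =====

-- B replaces A's set + priority loop + sorted()[0] with one keyed argmin pass (objective: simpler).

-- ===== PORT A =====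
-- str(r.get("state") or "unknown"): a missing key or empty string yields "unknown" (only "" is falsy here)
def pvStateOf (r : List (String × String)) : String :=
  match PySem.Dict.get? (PySem.Dict.mk r) "state" with
  | none => "unknown"
  | some v => if v = "" then "unknown" else v

def runner_rollup_status_py (runners : List (List (String × String))) : String :=
  if runners = [] then "registered"
  else
    let states : PySem.Set String := PySem.Set.ofList (runners.map pvStateOf)
    if "online" ∈ states then "online"
    else if "draining" ∈ states then "draining"
    else if "degraded" ∈ states then "degraded"
    else if "offline" ∈ states then "offline"
    else match PySem.List.sorted states (fun x => x) false with
      | m :: _ => m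
      | [] => "unknown"

-- ===== PORT B =====
-- key(s) = (priority.index(s), "") if s in priority else (len(priority), s)
def pvRank (s : String) : Nat :=
  if s = "online" then 0
  else if s = "draining" then 1
  else if s = "degraded" then 2
  else if s = "offline" then 3
  else 4

def pvSub (s : String) : String := if pvRank s = 4 then s else ""

def runner_rollup_status_py_alt (runners : List (List (String × String))) : String :=
  if runners = [] then "registered"
  else
    match PySem.List.min2? (runners.map pvStateOf) pvRank pvSub with
    | some m => m
    | none => "registered"   -- unreachable: the list is nonempty

-- ===== PRECONDITION & SPEC =====
def Spec_runner_rollup_status_py (runners : List (List (String × String))) (out : String) : Prop := out = runner_rollup_status_py_alt runners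
instance (runners : List (List (String × String))) (out : String) : Decidable (Spec_runner_rollup_status_py runners out) := by unfold Spec_runner_rollup_status_py; infer_instance

-- ===== CLAIM (what is proved, stated in full; the proofs are below) =====
def Claim_equal_runner_rollup_status_py : Prop := ∀ (runners : List (List (String × String))), Dom_runner_rollup_status_py runners → Spec_runner_rollup_status_py runners (runner_rollup_status_py runners)

-- ===== LEMMAS AND PROOFS =====

-- the fold step of PySem.List.min2? pvRank pvSub, named so the invariant can be stated about it
def pvStep (acc : Option String) (x : String) : Option String :=
  match acc with
  | none => some x
  | some m =>
    if (decide (pvRank x < pvRank m) || !decide (pvRank m < pvRank x) && decide (pvSub x < pvSub m)) = true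
    then some x else some m

theorem pvMin2_eq_foldl (L : List String) :
    PySem.List.min2? L pvRank pvSub = L.foldl pvStep none := by
  unfold PySem.List.min2? pvStep
  congr 1
  funext acc x
  cases acc <;> simp

-- B's key order, as a Prop: (pvRank a, pvSub a) ≤ (pvRank b, pvSub b) lexicographically
def pvLexLe (a b : String) : Prop :=
  pvRank a < pvRank b ∨ (pvRank a = pvRank b ∧ pvSub a ≤ pvSub b)

theorem pvLexLe_refl (a : String) : pvLexLe a a := Or.inr ⟨rfl, le_refl _⟩

theorem pvLexLe_trans {a b c : String} (h1 : pvLexLe a b) (h2 : pvLexLe b c) : pvLexLe a c := by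
  rcases h1 with h1 | ⟨h1, h1'⟩ <;> rcases h2 with h2 | ⟨h2, h2'⟩
  · exact Or.inl (h1.trans h2)
  · exact Or.inl (h2 ▸ h1)
  · exact Or.inl (h1 ▸ h2)
  · exact Or.inr ⟨h1.trans h2, h1'.trans h2'⟩

theorem pvCond_true {x m : String}
    (h : (decide (pvRank x < pvRank m) || (!decide (pvRank m < pvRank x) && decide (pvSub x < pvSub m))) = true) :
    pvLexLe x m := by
  simp only [Bool.or_eq_true, Bool.and_eq_true, Bool.not_eq_true', decide_eq_true_eq,
    decide_eq_false_iff_not] at h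
  rcases h with h | ⟨h1, h2⟩
  · exact Or.inl h
  · rcases Nat.lt_or_ge (pvRank x) (pvRank m) with h' | h'
    · exact Or.inl h'
    · exact Or.inr ⟨by omega, le_of_lt h2⟩

theorem pvCond_false {x m : String}
    (h : ¬ (decide (pvRank x < pvRank m) || (!decide (pvRank m < pvRank x) && decide (pvSub x < pvSub m))) = true) :
    pvLexLe m x := by
  simp only [Bool.or_eq_true, Bool.and_eq_true, Bool.not_eq_true', decide_eq_true_eq,
    decide_eq_false_iff_not, not_or, not_and] at h
  obtain ⟨h1, h2⟩ := h
  rcases Nat.lt_or_ge (pvRank m) (pvRank x) with h' | h'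
  · exact Or.inl h'
  · have hxm : ¬ pvRank m < pvRank x := Nat.not_lt.mpr h'
    have heq : pvRank m = pvRank x := Nat.le_antisymm (Nat.not_lt.mp h1) h'
    exact Or.inr ⟨heq, not_lt.mp (h2 hxm)⟩

-- invariant of B's fold: the accumulator is a member that is ≤ everything seen so far
theorem pvMin2Aux (xs : List String) : ∀ (m : String),
    ∃ m', xs.foldl pvStep (some m) = some m' ∧ m' ∈ m :: xs ∧ ∀ y ∈ m :: xs, pvLexLe m' y := by
  induction xs with
  | nil =>
      intro m
      exact ⟨m, rfl, List.mem_cons_self, by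
        intro y hy
        rcases List.mem_singleton.mp hy with rfl
        exact pvLexLe_refl _⟩
  | cons x t ih =>
      intro m
      by_cases hc : (decide (pvRank x < pvRank m) || !decide (pvRank m < pvRank x) && decide (pvSub x < pvSub m)) = true
      · obtain ⟨m', heq, hmem, hmin⟩ := ih x
        refine ⟨m', ?_, ?_, ?_⟩
        · rw [List.foldl_cons]
          show List.foldl pvStep (if _ = true then some x else some m) t = some m'
          rw [if_pos hc]; exact heq
        · rcases List.mem_cons.mp hmem with h | h
          · exact h ▸ List.mem_cons_of_mem _ List.mem_cons_self
          · exact List.mem_cons_of_mem _ (List.mem_cons_of_mem _ h)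
        · intro y hy
          rcases List.mem_cons.mp hy with rfl | hy
          · exact pvLexLe_trans (hmin x List.mem_cons_self) (pvCond_true hc)
          · exact hmin y hy
      · obtain ⟨m', heq, hmem, hmin⟩ := ih m
        refine ⟨m', ?_, ?_, ?_⟩
        · rw [List.foldl_cons]
          show List.foldl pvStep (if _ = true then some x else some m) t = some m'
          rw [if_neg hc]; exact heq
        · rcases List.mem_cons.mp hmem with h | h
          · exact h ▸ List.mem_cons_self
          · exact List.mem_cons_of_mem _ (List.mem_cons_of_mem _ h)
        · intro y hy
          rcases List.mem_cons.mp hy with rfl | hy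
          · exact hmin y List.mem_cons_self
          · rcases List.mem_cons.mp hy with rfl | hy
            · exact pvLexLe_trans (hmin m List.mem_cons_self) (pvCond_false hc)
            · exact hmin y (List.mem_cons_of_mem _ hy)

theorem pvMin2Spec (L : List String) (h : L ≠ []) :
    ∃ m, PySem.List.min2? L pvRank pvSub = some m ∧ m ∈ L ∧ ∀ y ∈ L, pvLexLe m y := by
  obtain ⟨x, t, rfl⟩ := List.exists_cons_of_ne_nil h
  obtain ⟨m', heq, hmem, hmin⟩ := pvMin2Aux t x
  refine ⟨m', ?_, hmem, hmin⟩
  rw [pvMin2_eq_foldl, List.foldl_cons]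
  exact heq

theorem pvRank_zero {s : String} (h : pvRank s = 0) : s = "online" := by
  unfold pvRank at h; split_ifs at h <;> simp_all

theorem pvRank_one {s : String} (h : pvRank s = 1) : s = "draining" := by
  unfold pvRank at h; split_ifs at h <;> simp_all

theorem pvRank_two {s : String} (h : pvRank s = 2) : s = "degraded" := by
  unfold pvRank at h; split_ifs at h <;> simp_all

theorem pvRank_three {s : String} (h : pvRank s = 3) : s = "offline" := by
  unfold pvRank at h; split_ifs at h <;> simp_all

theorem pvRank_four {s : String} (h0 : s ≠ "online") (h1 : s ≠ "draining")
    (h2 : s ≠ "degraded") (h3 : s ≠ "offline") : pvRank s = 4 := by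
  unfold pvRank; split_ifs <;> simp_all

-- the two cores agree on any nonempty list of states
theorem pvCore (L : List String) (hLne : L ≠ []) :
    (if "online" ∈ PySem.Set.ofList L then "online"
     else if "draining" ∈ PySem.Set.ofList L then "draining"
     else if "degraded" ∈ PySem.Set.ofList L then "degraded"
     else if "offline" ∈ PySem.Set.ofList L then "offline"
     else match PySem.List.sorted (PySem.Set.ofList L) (fun x => x) false with
       | m :: _ => m
       | [] => "unknown")
    = (match PySem.List.min2? L pvRank pvSub with
       | some m => m
       | none => "registered") := by
  obtain ⟨m, hmeq, hmem, hmin⟩ := pvMin2Spec L hLne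
  rw [hmeq]
  have hmemOf : ∀ s : String, s ∈ PySem.Set.ofList L ↔ s ∈ L := fun s => PySem.Set.mem_ofList L s
  have hrank_lit : pvRank "online" = 0 ∧ pvRank "draining" = 1 ∧ pvRank "degraded" = 2 ∧
      pvRank "offline" = 3 := by exact ⟨by decide, by decide, by decide, by decide⟩
  obtain ⟨hl0, hl1, hl2, hl3⟩ := hrank_lit
  by_cases h0 : "online" ∈ L
  · rw [if_pos ((hmemOf _).mpr h0)]
    have hr : pvRank m = 0 := by
      rcases hmin _ h0 with h | ⟨h, _⟩ <;> rw [hl0] at h <;> omega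
    exact (pvRank_zero hr).symm
  · rw [if_neg (fun hc => h0 ((hmemOf _).mp hc))]
    by_cases h1 : "draining" ∈ L
    · rw [if_pos ((hmemOf _).mpr h1)]
      have hr : pvRank m ≤ 1 := by
        rcases hmin _ h1 with h | ⟨h, _⟩ <;> rw [hl1] at h <;> omega
      have : pvRank m = 0 ∨ pvRank m = 1 := by omega
      rcases this with h | h
      · exact absurd (pvRank_zero h ▸ hmem) h0
      · exact (pvRank_one h).symm
    · rw [if_neg (fun hc => h1 ((hmemOf _).mp hc))]
      by_cases h2 : "degraded" ∈ L
      · rw [if_pos ((hmemOf _).mpr h2)]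
        have hr : pvRank m ≤ 2 := by
          rcases hmin _ h2 with h | ⟨h, _⟩ <;> rw [hl2] at h <;> omega
        have : pvRank m = 0 ∨ pvRank m = 1 ∨ pvRank m = 2 := by omega
        rcases this with h | h | h
        · exact absurd (pvRank_zero h ▸ hmem) h0
        · exact absurd (pvRank_one h ▸ hmem) h1
        · exact (pvRank_two h).symm
      · rw [if_neg (fun hc => h2 ((hmemOf _).mp hc))]
        by_cases h3 : "offline" ∈ L
        · rw [if_pos ((hmemOf _).mpr h3)]
          have hr : pvRank m ≤ 3 := by
            rcases hmin _ h3 with h | ⟨h, _⟩ <;> rw [hl3] at h <;> omega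
          have : pvRank m = 0 ∨ pvRank m = 1 ∨ pvRank m = 2 ∨ pvRank m = 3 := by omega
          rcases this with h | h | h | h
          · exact absurd (pvRank_zero h ▸ hmem) h0
          · exact absurd (pvRank_one h ▸ hmem) h1
          · exact absurd (pvRank_two h ▸ hmem) h2
          · exact (pvRank_three h).symm
        · rw [if_neg (fun hc => h3 ((hmemOf _).mp hc))]
          -- no priority state present: every state has rank 4, B's key is the state itself
          have hr4 : ∀ y ∈ L, pvRank y = 4 := fun y hy =>
            pvRank_four (fun h => h0 (h ▸ hy)) (fun h => h1 (h ▸ hy))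
              (fun h => h2 (h ▸ hy)) (fun h => h3 (h ▸ hy))
          have hOfne : PySem.Set.ofList L ≠ [] := by
            intro hc
            obtain ⟨x, t, rfl⟩ := List.exists_cons_of_ne_nil hLne
            have : x ∈ PySem.Set.ofList (x :: t) := (hmemOf x).mpr List.mem_cons_self
            simp [hc] at this
          have hsne : PySem.List.sorted (PySem.Set.ofList L) (fun x => x) false ≠ [] :=
            fun hc => hOfne ((PySem.List.sorted_eq_nil_iff _ _ _).mp hc)
          obtain ⟨hd, tl, hsort⟩ := List.exists_cons_of_ne_nil hsne
          rw [hsort]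
          have hhdL : hd ∈ L := by
            have : hd ∈ PySem.List.sorted (PySem.Set.ofList L) (fun x => x) false :=
              hsort ▸ List.mem_cons_self
            exact (hmemOf hd).mp ((PySem.List.mem_sorted _ _ _ _).mp this)
          have hhd_le : hd ≤ m :=
            PySem.List.key_head_sorted_le _ _ hsort m ((hmemOf m).mpr hmem)
          have hm_le : m ≤ hd := by
            rcases hmin hd hhdL with h | ⟨_, h'⟩
            · rw [hr4 m hmem, hr4 hd hhdL] at h; omega
            · simpa [pvSub, hr4 m hmem, hr4 hd hhdL] using h'
          exact le_antisymm hhd_le hm_le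

-- ===== VERDICT (by name: the statement is the Claim_ definition above) =====
theorem runner_rollup_status_py_spec : Claim_equal_runner_rollup_status_py := by
  intro runners _
  unfold Spec_runner_rollup_status_py runner_rollup_status_py runner_rollup_status_py_alt
  by_cases hnil : runners = []
  · simp [hnil]
  · simp only [if_neg hnil]
    exact pvCore (runners.map pvStateOf)
      (by simpa [List.map_eq_nil_iff] using hnil)
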